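-- pv_equiv track=rewrite | github.com/cestcedric/DailyInterviewPro | 2021/May/2021_05_15_non_decreasig_array.py | check
-- ===== SOURCE A (Python) =====
-- def check(nums: list) -> bool:
--     # O(n)
--     # Two independent errors cannot be fixed with one change
--     # One error can be fixed if at beginning or end, or removing if creates a valid array
--     error = -1
--     length = len(nums)
--     for i in range(length - 1):
--         if nums[i] > nums[i+1]:
--             if error != -1: return False
--             error = i
--
--     if error in [-1, 0, length - 2]:
--         return True
--     if nums[error-1] <= nums[error+1] or nums[error] <= nums[error+2]:
--         return True
--
--     return False
-- ===== SOURCE B (Python) =====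
-- def check(nums: list) -> bool:
--     # Greedy single pass: track the effective previous value and whether a fix was used.
--     if not nums:
--         return True
--     prev = nums[0]
--     used = False
--     for i in range(1, len(nums)):
--         x = nums[i]
--         if prev > x:
--             if used:
--                 return False
--             used = True
--             if i < 2 or nums[i-2] <= x:
--                 prev = x
--             # else: raise current element, prev unchanged
--         else:
--             prev = x
--     return True
-- ===== Notes on version B (the rewrite author's own statement) =====
-- stated objective: alternative
-- what changed: Replaced A's record-the-first-violation-index pass plus post-loop index arithmetic by the standard greedy single pass that repairs the effective previous value (prev/used state) inside the loop and detects a second violation against the repaired value.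
import Mathlib
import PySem

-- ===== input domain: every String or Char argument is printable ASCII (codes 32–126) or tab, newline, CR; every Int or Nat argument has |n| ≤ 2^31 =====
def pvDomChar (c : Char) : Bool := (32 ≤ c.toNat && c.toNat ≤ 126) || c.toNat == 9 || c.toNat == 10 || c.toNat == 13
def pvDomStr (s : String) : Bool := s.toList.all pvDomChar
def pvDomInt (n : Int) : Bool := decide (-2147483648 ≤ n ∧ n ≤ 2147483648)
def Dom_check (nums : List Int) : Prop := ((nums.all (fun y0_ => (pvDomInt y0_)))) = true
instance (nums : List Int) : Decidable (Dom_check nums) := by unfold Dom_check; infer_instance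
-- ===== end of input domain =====

-- B replaces A's "record the first violation index, finish with post-loop index arithmetic"
-- by the greedy single pass that repairs the effective previous value inside the loop (objective: alternative).

-- ===== PORT A =====
-- A's for-loop over i in range(length-1): state = error (Int, -1 = no error yet);
-- `none` = the early `return False`.  Loop indices are always in range, so getD's default is never read.
def checkLoop (nums : List Int) : Nat → Nat → Int → Option Int
  | _, 0, error => some error
  | i, rem + 1, error =>
    if nums.getD i 0 > nums.getD (i + 1) 0 then
      if error ≠ -1 then none
      else checkLoop nums (i + 1) rem (i : Int)
    else checkLoop nums (i + 1) rem error

-- the code after A's loop (its two final `if`s); pyGetD = Python indexing (indices here are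
-- in range whenever this point is reached with the loop's final error value)
def checkFin (nums : List Int) (error : Int) : Bool :=
  if error = -1 ∨ error = 0 ∨ error = (nums.length : Int) - 2 then true
  else if PySem.List.pyGetD nums (error - 1) 0 ≤ PySem.List.pyGetD nums (error + 1) 0 ∨
          PySem.List.pyGetD nums error 0 ≤ PySem.List.pyGetD nums (error + 2) 0 then true
  else false

def check (nums : List Int) : Bool :=
  match checkLoop nums 0 (nums.length - 1) (-1) with
  | none => false
  | some error => checkFin nums error

-- ===== PORT B =====
-- B's for-loop over i in range(1, len(nums)): state = (prev, used); `false` = the early `return False`.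
def checkAltLoop (nums : List Int) : Nat → Nat → Int → Bool → Bool
  | _, 0, _, _ => true
  | i, rem + 1, prev, used =>
    let x := nums.getD i 0
    if prev > x then
      if used then false
      else if i < 2 ∨ nums.getD (i - 2) 0 ≤ x then checkAltLoop nums (i + 1) rem x true
      else checkAltLoop nums (i + 1) rem prev true
    else checkAltLoop nums (i + 1) rem x used

def check_alt (nums : List Int) : Bool :=
  match nums with
  | [] => true
  | h :: _ => checkAltLoop nums 1 (nums.length - 1) h false

-- ===== PRECONDITION & SPEC =====
def Spec_check (nums : List Int) (out : Bool) : Prop := out = check_alt nums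
instance (nums : List Int) (out : Bool) : Decidable (Spec_check nums out) := by unfold Spec_check; infer_instance

-- ===== CLAIM (what is proved, stated in full; the proofs are below) =====
def Claim_equal_check : Prop := ∀ (nums : List Int), Dom_check nums → Spec_check nums (check nums)

-- ===== LEMMAS AND PROOFS =====

-- A's loop followed by its post-loop processing, as one Bool-valued run
def Arun (nums : List Int) (j rem : Nat) (er : Int) : Bool :=
  match checkLoop nums j rem er with
  | none => false
  | some e => checkFin nums e

theorem Arun_succ (nums : List Int) (j rem : Nat) (er : Int) :
    Arun nums j (rem + 1) er =
      if nums.getD j 0 > nums.getD (j + 1) 0 then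
        (if er ≠ -1 then false else Arun nums (j + 1) rem (j : Int))
      else Arun nums (j + 1) rem er := by
  simp only [Arun, checkLoop]
  split_ifs <;> rfl

theorem alt_succ (nums : List Int) (i rem : Nat) (prev : Int) (used : Bool) :
    checkAltLoop nums i (rem + 1) prev used =
      if prev > nums.getD i 0 then
        (if used then false
         else if i < 2 ∨ nums.getD (i - 2) 0 ≤ nums.getD i 0 then
           checkAltLoop nums (i + 1) rem (nums.getD i 0) true
         else checkAltLoop nums (i + 1) rem prev true)
      else checkAltLoop nums (i + 1) rem (nums.getD i 0) used := rfl

theorem pyGetD_cast (nums : List Int) (k : Nat) :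
    PySem.List.pyGetD nums (k : Int) 0 = nums.getD k 0 := by
  simp [PySem.List.pyGetD_natCast]

theorem checkFin_neg_one (nums : List Int) : checkFin nums (-1) = true := by
  simp [checkFin]

theorem checkFin_zero (nums : List Int) : checkFin nums 0 = true := by
  simp [checkFin]

theorem checkFin_last (nums : List Int) (e : Nat) (h : e + 2 = nums.length) :
    checkFin nums (e : Int) = true := by
  have : (e : Int) = (nums.length : Int) - 2 := by omega
  simp [checkFin, this]

theorem checkFin_true_of_low (nums : List Int) (e : Nat) (he : 1 ≤ e)
    (h : nums.getD (e - 1) 0 ≤ nums.getD (e + 1) 0) :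
    checkFin nums (e : Int) = true := by
  unfold checkFin
  by_cases h1 : (e : Int) = -1 ∨ (e : Int) = 0 ∨ (e : Int) = (nums.length : Int) - 2
  · rw [if_pos h1]
  · rw [if_neg h1, if_pos]
    left
    have e1 : ((e : Int) - 1) = ((e - 1 : Nat) : Int) := by omega
    have e2 : ((e : Int) + 1) = ((e + 1 : Nat) : Int) := by omega
    rw [e1, e2, pyGetD_cast, pyGetD_cast]
    exact h

theorem checkFin_true_of_high (nums : List Int) (e : Nat)
    (h : nums.getD e 0 ≤ nums.getD (e + 2) 0) :
    checkFin nums (e : Int) = true := by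
  unfold checkFin
  by_cases h1 : (e : Int) = -1 ∨ (e : Int) = 0 ∨ (e : Int) = (nums.length : Int) - 2
  · rw [if_pos h1]
  · rw [if_neg h1, if_pos]
    right
    have e2 : ((e : Int) + 2) = ((e + 2 : Nat) : Int) := by omega
    rw [e2, pyGetD_cast, pyGetD_cast]
    exact h

theorem checkFin_false (nums : List Int) (e : Nat) (he : 1 ≤ e) (hn : e + 2 < nums.length)
    (hlow : nums.getD (e + 1) 0 < nums.getD (e - 1) 0)
    (hhigh : nums.getD (e + 2) 0 < nums.getD e 0) :
    checkFin nums (e : Int) = false := by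
  unfold checkFin
  have e1 : ((e : Int) - 1) = ((e - 1 : Nat) : Int) := by omega
  have e2 : ((e : Int) + 1) = ((e + 1 : Nat) : Int) := by omega
  have e3 : ((e : Int) + 2) = ((e + 2 : Nat) : Int) := by omega
  have c1 : ¬ ((e : Int) = -1 ∨ (e : Int) = 0 ∨ (e : Int) = (nums.length : Int) - 2) := by
    rintro (h | h | h) <;> omega
  have c2 : ¬ (PySem.List.pyGetD nums ((e : Int) - 1) 0 ≤ PySem.List.pyGetD nums ((e : Int) + 1) 0 ∨
      PySem.List.pyGetD nums (e : Int) 0 ≤ PySem.List.pyGetD nums ((e : Int) + 2) 0) := by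
    rw [e1, e2, e3, pyGetD_cast, pyGetD_cast, pyGetD_cast, pyGetD_cast]
    rintro (h | h) <;> omega
  rw [if_neg c1, if_neg c2]

-- A run that still carries a recorded error whose final verdict is already false returns false
theorem doomed (nums : List Int) (rem : Nat) :
    ∀ (j : Nat) (er : Int), er ≠ -1 → checkFin nums er = false →
      Arun nums j rem er = false := by
  induction rem with
  | zero => intro j er _ hfin; simpa [Arun, checkLoop] using hfin
  | succ rem ih =>
    intro j er hne hfin
    rw [Arun_succ]
    by_cases hv : nums.getD j 0 > nums.getD (j + 1) 0
    · rw [if_pos hv, if_pos hne]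
    · rw [if_neg hv]
      exact ih (j + 1) er hne hfin

-- when greedy's prev again tracks the raw previous element and the final verdict of A's
-- recorded error is already true, the two runs agree step for step
theorem agree_tracked (nums : List Int) (rem : Nat) :
    ∀ (j : Nat) (er : Int), er ≠ -1 → checkFin nums er = true →
      Arun nums j rem er = checkAltLoop nums (j + 1) rem (nums.getD j 0) true := by
  induction rem with
  | zero => intro j er _ hfin; simpa [Arun, checkLoop, checkAltLoop] using hfin
  | succ rem ih =>
    intro j er hne hfin
    rw [Arun_succ, alt_succ]
    by_cases hv : nums.getD j 0 > nums.getD (j + 1) 0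
    · rw [if_pos hv, if_pos hv, if_pos hne, if_pos rfl]
    · rw [if_neg hv, if_neg hv]
      exact ih (j + 1) er hne hfin

-- just after a "raise the current element" fix at pair (e, e+1): greedy keeps prev = nums[e]
theorem agree_raised (nums : List Int) (rem e : Nat)
    (hlen : e + 2 + rem = nums.length) (he : 1 ≤ e)
    (hviol : nums.getD (e + 1) 0 < nums.getD e 0)
    (hlow : nums.getD (e + 1) 0 < nums.getD (e - 1) 0) :
    Arun nums (e + 1) rem (e : Int) = checkAltLoop nums (e + 2) rem (nums.getD e 0) true := by
  cases rem with
  | zero =>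
    simp only [Arun, checkLoop, checkAltLoop]
    exact checkFin_last nums e (by omega)
  | succ rem =>
    rw [Arun_succ, alt_succ]
    have hpp : e + 1 + 1 = e + 2 := rfl
    rw [hpp]
    by_cases hge : nums.getD e 0 > nums.getD (e + 2) 0
    · rw [if_pos hge, if_pos rfl]
      by_cases hv : nums.getD (e + 1) 0 > nums.getD (e + 2) 0
      · rw [if_pos hv, if_pos (by omega : (e : Int) ≠ -1)]
      · rw [if_neg hv]
        -- A keeps scanning with error = e, but its final verdict is already false
        exact doomed nums rem (e + 2) (e : Int) (by omega)
          (checkFin_false nums e he (by omega) hlow (by omega))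
    · have hv : ¬ nums.getD (e + 1) 0 > nums.getD (e + 2) 0 := by omega
      rw [if_neg hv, if_neg hge]
      exact agree_tracked nums rem (e + 2) (e : Int) (by omega)
        (checkFin_true_of_high nums e (by omega))

-- before any violation: A's error is -1 and greedy's prev is the raw previous element
theorem agree_clean (nums : List Int) (rem : Nat) :
    ∀ (j : Nat), j + 1 + rem = nums.length →
      Arun nums j rem (-1) = checkAltLoop nums (j + 1) rem (nums.getD j 0) false := by
  induction rem with
  | zero => intro j _; simp [Arun, checkLoop, checkAltLoop, checkFin_neg_one]
  | succ rem ih =>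
    intro j hlen
    rw [Arun_succ, alt_succ]
    by_cases hv : nums.getD j 0 > nums.getD (j + 1) 0
    · -- first violation, at pair (j, j+1)
      rw [if_pos hv, if_pos hv, if_neg (by simp : ¬ ((-1 : Int) ≠ -1)),
          if_neg (by simp : ¬ (false = true))]
      have hidx : j + 1 - 2 = j - 1 := by omega
      by_cases hc : j + 1 < 2 ∨ nums.getD (j + 1 - 2) 0 ≤ nums.getD (j + 1) 0
      · rw [if_pos hc]
        -- "lower the previous element": prev := nums[j+1]; A's final verdict at j is true
        refine agree_tracked nums rem (j + 1) (j : Int) (by omega) ?_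
        by_cases hj0 : j = 0
        · subst hj0; exact checkFin_zero nums
        · rcases hc with hj | hlow
          · omega
          · rw [hidx] at hlow
            exact checkFin_true_of_low nums j (by omega) hlow
      · rw [if_neg hc]
        push Not at hc
        rw [hidx] at hc
        exact agree_raised nums rem j (by omega) (by omega) (by omega) (by omega)
    · rw [if_neg hv, if_neg hv]
      exact ih (j + 1) (by omega)

theorem check_eq_alt (nums : List Int) : check nums = check_alt nums := by
  cases nums with
  | nil => decide
  | cons h t =>
    have hA : check (h :: t) = Arun (h :: t) 0 ((h :: t).length - 1) (-1) := rfl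
    rw [hA]
    have := agree_clean (h :: t) t.length 0 (by simp; omega)
    simp only [List.length_cons, Nat.add_sub_cancel]
    simpa [check_alt, List.getD] using this

-- ===== VERDICT (by name: the statement is the Claim_ definition above) =====
theorem check_spec : Claim_equal_check := by
  intro nums _
  unfold Spec_check
  exact check_eq_alt nums
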